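-- pv_equiv track=rewrite | github.com/devopspatel/Python | PY_TEST/TEST/Prosper_Interview.py | find_seq_v1
-- ===== SOURCE A (Python) =====
-- def find_seq_v1(lst):
--     final_ans = 0
--     final_list = []
--
--     for i in range(len(lst)):
--         temp_ans = 1
--         temp_list = [lst[i]]
--         for j in range((i+1), len(lst)):
--             if (lst[j-1] < lst[j]):
--                 temp_ans += 1
--                 temp_list.append(lst[j])
--         if (temp_ans > final_ans):
--             final_ans = temp_ans
--             final_list = temp_list
-- #         print (f'TEMP LENGTH: {temp_ans} > TEMP LIST: {temp_list}')
--     return (f'FINAL LENGTH: {final_ans} > FINAL LIST: {final_list}')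
-- ===== SOURCE B (Python) =====
-- def find_seq_v1(lst):
--     # Only i = 0 can win A's strict-improvement contest, so one pass suffices.
--     if not lst:
--         return 'FINAL LENGTH: 0 > FINAL LIST: []'
--     res = [lst[0]]
--     for prev, cur in zip(lst, lst[1:]):
--         if prev < cur:
--             res.append(cur)
--     return f'FINAL LENGTH: {len(res)} > FINAL LIST: {res}'
-- ===== Notes on version B (the rewrite author's own statement) =====
-- stated objective: faster
-- what changed: A's outer loop is dropped: since the strict '>' update means only i=0 can ever win, B does a single pass over adjacent pairs building the i=0 answer directly.
import Mathlib
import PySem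

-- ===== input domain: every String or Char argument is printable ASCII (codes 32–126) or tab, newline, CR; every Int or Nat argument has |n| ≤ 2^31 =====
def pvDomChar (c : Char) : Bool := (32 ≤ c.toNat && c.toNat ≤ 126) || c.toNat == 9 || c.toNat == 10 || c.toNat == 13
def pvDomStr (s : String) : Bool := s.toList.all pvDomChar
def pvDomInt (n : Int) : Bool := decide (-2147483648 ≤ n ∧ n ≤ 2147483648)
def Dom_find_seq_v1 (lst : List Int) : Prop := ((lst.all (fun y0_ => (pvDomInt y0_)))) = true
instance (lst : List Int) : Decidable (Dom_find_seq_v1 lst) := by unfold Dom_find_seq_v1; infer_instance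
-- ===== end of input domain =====

-- B drops A's quadratic outer loop: A's strict '>' update means only i = 0 can win, so a
-- single pass over adjacent pairs builds the answer (objective: faster).

-- shared transliteration of the f-string "FINAL LENGTH: {k} > FINAL LIST: {xs}"
def pvListRepr (xs : List Int) : String :=
  "[" ++ String.intercalate ", " (xs.map PySem.Int.toStr) ++ "]"

def pvFmt (k : Int) (xs : List Int) : String :=
  "FINAL LENGTH: " ++ PySem.Int.toStr k ++ " > FINAL LIST: " ++ pvListRepr xs

-- ===== PORT A =====
def find_seq_v1 (lst : List Int) : String :=
  let n : Int := PySem.List.len lst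
  let final :=
    (PySem.List.pyRange 0 n 1).foldl
      (fun (fin : Int × List Int) i =>
        let temp :=
          (PySem.List.pyRange (i + 1) n 1).foldl
            (fun (st : Int × List Int) j =>
              if PySem.List.pyGetD lst (j - 1) 0 < PySem.List.pyGetD lst j 0 then
                (st.1 + 1, st.2 ++ [PySem.List.pyGetD lst j 0])
              else st)
            (1, [PySem.List.pyGetD lst i 0])
        if temp.1 > fin.1 then temp else fin)
      (0, [])
  pvFmt final.1 final.2

-- ===== PORT B =====
def find_seq_v1_alt (lst : List Int) : String :=
  match lst with
  | [] => "FINAL LENGTH: 0 > FINAL LIST: []"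
  | x :: rest =>
    let res := (lst.zip rest).foldl
      (fun (acc : List Int) p => if p.1 < p.2 then acc ++ [p.2] else acc) [x]
    pvFmt (res.length : Int) res

-- ===== PRECONDITION & SPEC =====
def Spec_find_seq_v1 (lst : List Int) (out : String) : Prop := out = find_seq_v1_alt lst
instance (lst : List Int) (out : String) : Decidable (Spec_find_seq_v1 lst out) := by unfold Spec_find_seq_v1; infer_instance

-- ===== CLAIM (what is proved, stated in full; the proofs are below) =====
def Claim_equal_find_seq_v1 : Prop := ∀ (lst : List Int), Dom_find_seq_v1 lst → Spec_find_seq_v1 lst (find_seq_v1 lst)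

-- ===== LEMMAS AND PROOFS =====

-- A's inner loop at start index i (proof-side name for the loop body of the port of A)
def pvInner (L : List Int) (i : Int) : Int × List Int :=
  (PySem.List.pyRange (i + 1) (PySem.List.len L) 1).foldl
    (fun (st : Int × List Int) j =>
      if PySem.List.pyGetD L (j - 1) 0 < PySem.List.pyGetD L j 0 then
        (st.1 + 1, st.2 ++ [PySem.List.pyGetD L j 0])
      else st)
    (1, [PySem.List.pyGetD L i 0])

-- the ascending-pair test and element picker, as functions of the right index j
def pvPb (L : List Int) : Int → Bool :=
  fun j => decide (PySem.List.pyGetD L (j - 1) 0 < PySem.List.pyGetD L j 0)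

def pvG (L : List Int) : Int → Int := fun j => PySem.List.pyGetD L j 0

-- A's inner loop in closed form: count and collect the passing indices.
theorem inner_fold_eq (L R : List Int) (a : Int) (b : List Int) :
    R.foldl
      (fun (st : Int × List Int) j =>
        if PySem.List.pyGetD L (j - 1) 0 < PySem.List.pyGetD L j 0 then
          (st.1 + 1, st.2 ++ [PySem.List.pyGetD L j 0])
        else st)
      (a, b)
    = (a + (((R.filter (pvPb L)).length : Nat) : Int), b ++ (R.filter (pvPb L)).map (pvG L)) := by
  induction R generalizing a b with
  | nil => simp
  | cons x xs ih =>
    by_cases h : PySem.List.pyGetD L (x - 1) 0 < PySem.List.pyGetD L x 0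
    · rw [List.foldl_cons, if_pos h, ih]
      refine Prod.ext ?_ ?_
      · simp [pvPb, h]; omega
      · simp [pvPb, pvG, h]
    · rw [List.foldl_cons, if_neg h, ih]
      simp [pvPb, h]

theorem pvInner_eq (L : List Int) (i : Int) :
    pvInner L i
      = (1 + ((((PySem.List.pyRange (i + 1) (PySem.List.len L) 1).filter (pvPb L)).length : Nat) : Int),
         [PySem.List.pyGetD L i 0]
           ++ ((PySem.List.pyRange (i + 1) (PySem.List.len L) 1).filter (pvPb L)).map (pvG L)) :=
  inner_fold_eq L _ 1 _

-- the max-update fold stays put when nothing strictly beats the current state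
theorem outer_fold_skip (L : List Int) (R : List Int) (st : Int × List Int)
    (h : ∀ i ∈ R, (pvInner L i).1 ≤ st.1) :
    R.foldl (fun (fin : Int × List Int) i => if (pvInner L i).1 > fin.1 then pvInner L i else fin) st
      = st := by
  induction R with
  | nil => rfl
  | cons x xs ih =>
    have hx := h x (by simp)
    rw [List.foldl_cons, if_neg (by omega)]
    exact ih (fun i hi => h i (by simp [hi]))

-- B's loop in closed form
theorem bfold_eq (Lp : List (Int × Int)) (acc : List Int) :
    Lp.foldl (fun (acc : List Int) p => if p.1 < p.2 then acc ++ [p.2] else acc) acc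
      = acc ++ (Lp.filter (fun p => decide (p.1 < p.2))).map (·.2) := by
  induction Lp generalizing acc with
  | nil => simp
  | cons y ys ih =>
    by_cases h : y.1 < y.2
    · rw [List.foldl_cons, if_pos h, ih]
      simp [h]
    · rw [List.foldl_cons, if_neg h, ih]
      simp [h]

-- Bridge: the index range 1..n paired with its predecessor is exactly zip lst lst.tail.
theorem pyRange_pairs_eq_zip (lst : List Int) :
    (PySem.List.pyRange 1 (PySem.List.len lst) 1).map
        (fun j => (PySem.List.pyGetD lst (j - 1) 0, PySem.List.pyGetD lst j 0))
      = lst.zip lst.tail := by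
  apply List.ext_getElem
  · simp [PySem.List.length_pyRange_one]
  · intro k h1 h2
    have hk : k < lst.length - 1 := by
      simpa [PySem.List.length_pyRange_one] using h1
    rw [List.getElem_map, PySem.List.getElem_pyRange_one]
    have e1 : (1 : Int) + (k : Int) - 1 = ((k : Nat) : Int) := by omega
    have e2 : (1 : Int) + (k : Int) = (((k + 1 : Nat)) : Int) := by push_cast; omega
    rw [e1, e2, PySem.List.pyGetD_natCast, PySem.List.pyGetD_natCast, List.getElem_zip]
    have hk1 : k < lst.length := by omega
    have hk2 : k + 1 < lst.length := by omega
    refine Prod.ext ?_ ?_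
    · simp [List.getD_eq_getElem?_getD, hk1]
    · simp [List.getD_eq_getElem?_getD, hk2, List.getElem_tail]

theorem find_seq_v1_spec' (lst : List Int) : find_seq_v1 lst = find_seq_v1_alt lst := by
  cases lst with
  | nil => decide
  | cons x rest =>
    have n0 : (0 : Int) < PySem.List.len (x :: rest) := by simp
    -- both ports, written through the proof-side names (definitional equalities)
    have hA : find_seq_v1 (x :: rest)
        = pvFmt
            ((PySem.List.pyRange 0 (PySem.List.len (x :: rest)) 1).foldl
              (fun (fin : Int × List Int) i =>
                if (pvInner (x :: rest) i).1 > fin.1 then pvInner (x :: rest) i else fin)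
              (0, [])).1
            ((PySem.List.pyRange 0 (PySem.List.len (x :: rest)) 1).foldl
              (fun (fin : Int × List Int) i =>
                if (pvInner (x :: rest) i).1 > fin.1 then pvInner (x :: rest) i else fin)
              (0, [])).2 := rfl
    have hB : find_seq_v1_alt (x :: rest)
        = pvFmt
            ((((x :: rest).zip rest).foldl
              (fun (acc : List Int) p => if p.1 < p.2 then acc ++ [p.2] else acc) [x]).length : Int)
            (((x :: rest).zip rest).foldl
              (fun (acc : List Int) p => if p.1 < p.2 then acc ++ [p.2] else acc) [x]) := rfl
    rw [hA, hB, bfold_eq]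
    rw [PySem.List.pyRange_one_cons n0, List.foldl_cons]
    have hpos : ((0 : Int), ([] : List Int)).1 < (pvInner (x :: rest) 0).1 := by
      rw [pvInner_eq]
      show (0 : Int) < 1 + _
      positivity
    rw [if_pos hpos]
    have hbound : ∀ i ∈ PySem.List.pyRange 1 (PySem.List.len (x :: rest)) 1,
        (pvInner (x :: rest) i).1 ≤ (pvInner (x :: rest) 0).1 := by
      intro i hi
      obtain ⟨h1, h2⟩ := (PySem.List.mem_pyRange_one).1 hi
      rw [pvInner_eq, pvInner_eq]
      simp only [zero_add]
      have hsplit : PySem.List.pyRange 1 (PySem.List.len (x :: rest)) 1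
          = PySem.List.pyRange 1 (i + 1) 1 ++ PySem.List.pyRange (i + 1) (PySem.List.len (x :: rest)) 1 :=
        PySem.List.pyRange_one_append 1 (i + 1) (PySem.List.len (x :: rest)) (by omega) (by omega)
      rw [hsplit, List.filter_append, List.length_append]
      push_cast
      omega
    simp only [zero_add]
    rw [outer_fold_skip (x :: rest) _ _ hbound, pvInner_eq]
    simp only [zero_add]
    -- bridge the filtered index range to the filtered zip
    have hmaps :
        ((PySem.List.pyRange 1 (PySem.List.len (x :: rest)) 1).filter (pvPb (x :: rest))).map (pvG (x :: rest))
          = (((x :: rest).zip rest).filter (fun p => decide (p.1 < p.2))).map (·.2) := by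
      have hz := pyRange_pairs_eq_zip (x :: rest)
      rw [List.tail_cons] at hz
      rw [← hz, List.filter_map, List.map_map]
      simp only [Function.comp_def]
      rfl
    have hlen : ((PySem.List.pyRange 1 (PySem.List.len (x :: rest)) 1).filter (pvPb (x :: rest))).length
        = ((((x :: rest).zip rest).filter (fun p => decide (p.1 < p.2))).map (·.2)).length := by
      rw [← hmaps, List.length_map]
    have hx0 : PySem.List.pyGetD (x :: rest) (0 : Int) 0 = x := by
      simp [PySem.List.pyGetD_zero_cons]
    rw [hmaps, hx0]
    congr 1
    rw [hlen]
    simp only [List.length_append, List.length_cons, List.length_nil]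
    push_cast
    ring

-- ===== VERDICT (by name: the statement is the Claim_ definition above) =====
theorem find_seq_v1_spec : Claim_equal_find_seq_v1 := by
  intro lst _
  unfold Spec_find_seq_v1
  exact find_seq_v1_spec' lst
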